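-- pv_equiv track=rewrite | github.com/morrisonmatthewb/DocumentationGenerator | utils/api.py | _organize_docs_by_directory
-- ===== SOURCE A (Python) =====
-- from typing import Dict, Any, Optional, List, Tuple
--
-- def _organize_docs_by_directory(
--     docs: Dict[str, str], files: Dict[str, Dict[str, Any]]
-- ) -> Dict[str, List[Tuple[str, str]]]:
--     """Organize documentation by directory structure."""
--
--     dir_structure = {}
--
--     for file_path, doc_content in docs.items():
--         # Get directory from original file info
--         dir_path = files.get(file_path, {}).get("directory", "")
--
--         if dir_path not in dir_structure:
--             dir_structure[dir_path] = []
--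
--         dir_structure[dir_path].append((file_path, doc_content))
--
--     return dir_structure
-- ===== SOURCE B (Python) =====
-- def _organize_docs_by_directory(docs, files):
--     """Organize documentation by directory structure (group-by via dedup + filter)."""
--     tagged = [(files.get(fp, {}).get("directory", ""), fp, doc) for fp, doc in docs.items()]
--     order = dict.fromkeys(t[0] for t in tagged)
--     return {d: [(fp, doc) for dd, fp, doc in tagged if dd == d] for d in order}
-- ===== Notes on version B (the rewrite author's own statement) =====
-- stated objective: alternative
-- what changed: Replaces A's single-pass hash-bucketing (check-membership, insert empty bucket, append) with a two-phase group-by: tag each doc entry with its directory, deduplicate the directory keys in first-occurrence order, then build each group by filtering the tagged list per key.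
import Mathlib
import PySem

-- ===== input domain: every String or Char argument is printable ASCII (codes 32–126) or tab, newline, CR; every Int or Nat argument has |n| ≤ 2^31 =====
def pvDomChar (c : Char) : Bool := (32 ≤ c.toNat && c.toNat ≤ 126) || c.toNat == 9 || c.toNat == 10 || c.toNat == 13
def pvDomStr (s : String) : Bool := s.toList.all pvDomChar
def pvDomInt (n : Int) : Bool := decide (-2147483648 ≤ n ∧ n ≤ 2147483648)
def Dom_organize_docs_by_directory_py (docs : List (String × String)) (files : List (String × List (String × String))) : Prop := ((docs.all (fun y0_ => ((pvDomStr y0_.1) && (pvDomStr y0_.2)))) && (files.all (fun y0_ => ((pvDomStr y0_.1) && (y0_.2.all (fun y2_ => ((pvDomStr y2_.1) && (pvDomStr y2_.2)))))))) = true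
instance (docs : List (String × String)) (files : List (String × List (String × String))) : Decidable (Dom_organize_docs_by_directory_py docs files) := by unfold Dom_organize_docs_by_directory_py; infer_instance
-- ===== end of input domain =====

-- B replaces A's single-pass hash-bucketing with dedup-the-keys-then-filter-per-key group-by (alternative decomposition, same results).


-- ===== PORT A =====
-- files.get(file_path, {}).get("directory", "")
def pvDirOf (files : List (String × List (String × String))) (fp : String) : String :=
  PySem.Dict.getD (PySem.Dict.mk (PySem.Dict.getD (PySem.Dict.mk files) fp [])) "directory" ""

def organize_docs_by_directory_py (docs : List (String × String)) (files : List (String × List (String × String))) : List (String × List (String × String)) :=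
  (docs.foldl
    (fun dir_structure p =>
      let dir_path := pvDirOf files p.1
      let ds := if dir_structure.contains dir_path then dir_structure
                else dir_structure.insert dir_path []
      ds.modify dir_path [] (fun l => l ++ [(p.1, p.2)]))
    (PySem.Dict.empty : PySem.Dict String (List (String × String)))).items

-- ===== PORT B =====
def organize_docs_by_directory_py_alt (docs : List (String × String)) (files : List (String × List (String × String))) : List (String × List (String × String)) :=
  let tagged : List (String × String × String) := docs.map (fun p => (pvDirOf files p.1, p.1, p.2))
  let order := PySem.List.dedup (tagged.map (fun t => t.1))
  -- 'order' is duplicate-free (dict.fromkeys), so the dict comprehension emits exactly one pair per key, in order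
  order.map (fun d => (d, (tagged.filter (fun t => t.1 == d)).map (fun t => (t.2.1, t.2.2))))

-- ===== PRECONDITION & SPEC =====
def Spec_organize_docs_by_directory_py (docs : List (String × String)) (files : List (String × List (String × String))) (out : List (String × List (String × String))) : Prop := out = organize_docs_by_directory_py_alt docs files
instance (docs : List (String × String)) (files : List (String × List (String × String))) (out : List (String × List (String × String))) : Decidable (Spec_organize_docs_by_directory_py docs files out) := by unfold Spec_organize_docs_by_directory_py; infer_instance

-- ===== CLAIM (what is proved, stated in full; the proofs are below) =====
def Claim_equal_organize_docs_by_directory_py : Prop := ∀ (docs : List (String × String)) (files : List (String × List (String × String))), Dom_organize_docs_by_directory_py docs files → Spec_organize_docs_by_directory_py docs files (organize_docs_by_directory_py docs files)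

-- ===== LEMMAS AND PROOFS =====

-- A's membership-check-then-insert-empty branch is absorbed by the following modify-with-default-[].
theorem pv_branch_absorb (d : PySem.Dict String (List (String × String))) (k : String) (p : String × String) :
    (if d.contains k then d else d.insert k []).modify k [] (fun l => l ++ [p])
      = d.modify k [] (fun l => l ++ [p]) := by
  by_cases h : d.contains k
  · simp [h]
  · simp only [Bool.not_eq_true] at h
    rw [if_neg (by simp [h])]
    unfold PySem.Dict.modify
    simp [PySem.Dict.getD_insert_self, PySem.Dict.insert_insert_self,
      PySem.Dict.getD_of_not_contains d [] h]

theorem organize_A_eq (docs : List (String × String)) (files : List (String × List (String × String))) :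
    organize_docs_by_directory_py docs files = organize_docs_by_directory_py_alt docs files := by
  simp only [organize_docs_by_directory_py, organize_docs_by_directory_py_alt]
  have hstep : (fun (ds : PySem.Dict String (List (String × String))) (p : String × String) =>
        (if ds.contains (pvDirOf files p.1) then ds else ds.insert (pvDirOf files p.1) []).modify
          (pvDirOf files p.1) [] (fun l => l ++ [(p.1, p.2)]))
      = fun ds p => ds.modify (pvDirOf files p.1) [] (fun l => l ++ [(p.1, p.2)]) :=
    funext fun ds => funext fun p => pv_branch_absorb ds _ _
  rw [hstep]
  rw [show (fun (ds : PySem.Dict String (List (String × String))) (p : String × String) =>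
        ds.modify (pvDirOf files p.1) [] (fun l => l ++ [(p.1, p.2)]))
      = (fun ds p => ds.modify ((fun q : String × String => (pvDirOf files q.1, q)) p).1 []
          (fun l => l ++ [((fun q : String × String => (pvDirOf files q.1, q)) p).2])) from rfl]
  rw [← List.foldl_map (f := fun q : String × String => (pvDirOf files q.1, q))
        (g := fun (ds : PySem.Dict String (List (String × String))) (t : String × (String × String)) =>
          ds.modify t.1 [] (fun l => l ++ [t.2]))]
  rw [PySem.Dict.items_eq_map_keys _
        (PySem.Dict.nodup_keys_foldl_modify_key _ _ _ _ _ PySem.Dict.nodup_keys_empty) []]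
  rw [PySem.Dict.keys_foldl_modify_key]
  simp only [PySem.Dict.getD_foldl_modify_append, PySem.Dict.getD_empty, PySem.Dict.keys_empty,
    PySem.Set.update_nil_left, PySem.List.dedup_eq_ofList, List.map_map]
  rfl

-- ===== VERDICT (by name: the statement is the Claim_ definition above) =====
theorem organize_docs_by_directory_py_spec : Claim_equal_organize_docs_by_directory_py := by
  intro docs files _
  exact organize_A_eq docs files
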